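-- pv_equiv track=rewrite | github.com/cur1osus/makeinvocebot | bot/utils/price.py | search
-- ===== SOURCE A (Python) =====
-- from collections import defaultdict
-- from typing_extensions import Iterable
--
-- def search(input: str, catalog: Iterable) -> list[str]:
--     """Поиск по частичным совпадениям, ранжированный по числу совпадений"""
--     terms = input.lower().split()
--     scores = defaultdict(int)
--
--     for item in catalog:
--         lowered = item.lower()
--         match_count = sum(term in lowered for term in terms)
--         if match_count > 0:
--             scores[item] = match_count
--
--     return sorted(scores, key=lambda x: (-scores[x], x))
-- ===== SOURCE B (Python) =====
-- def search(input: str, catalog) -> list[str]: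
--     """Bucket (counting) ranking: group deduped items by match count, emit buckets from highest count down, each sorted by name."""
--     terms = input.lower().split()
--     groups = {}
--     for item in dict.fromkeys(catalog):
--         lowered = item.lower()
--         c = sum(term in lowered for term in terms)
--         groups.setdefault(c, []).append(item)
--     result = []
--     for c in reversed(range(1, len(terms) + 1)):
--         result += sorted(groups.get(c, []))
--     return result
-- ===== Notes on version B (the rewrite author's own statement) =====
-- stated objective: alternative
-- what changed: B replaces A's comparison sort under the composite key (-score, name) by a bucket/counting sort: deduped items are grouped into buckets by match count (bounded by the number of terms), and buckets are emitted from the highest count down, each sorted by name (ascending), which reproduces the (-score, name) order exactly.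
import Mathlib
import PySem

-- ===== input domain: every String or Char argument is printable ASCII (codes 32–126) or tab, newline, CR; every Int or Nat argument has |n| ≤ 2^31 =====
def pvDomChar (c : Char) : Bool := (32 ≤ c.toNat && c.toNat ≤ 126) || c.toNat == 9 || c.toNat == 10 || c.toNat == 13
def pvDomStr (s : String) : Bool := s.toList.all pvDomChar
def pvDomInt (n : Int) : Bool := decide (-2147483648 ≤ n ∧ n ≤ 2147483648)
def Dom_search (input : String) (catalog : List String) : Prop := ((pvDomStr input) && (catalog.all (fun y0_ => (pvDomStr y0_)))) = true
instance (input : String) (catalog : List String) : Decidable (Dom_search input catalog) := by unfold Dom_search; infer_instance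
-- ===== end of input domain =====

-- B replaces A's comparison sort under the composite key (-score, name) by a bucket sort:
-- deduped items are grouped by match count, and buckets are emitted from the highest count
-- down, each sorted by name (objective: alternative algorithm, same observable result).

-- ===== PORT A =====
def search (input : String) (catalog : List String) : List String :=
  let terms := PySem.Str.split₀ (PySem.Str.lower input)
  let scores := catalog.foldl (fun scores item =>
      let lowered := PySem.Str.lower item
      let matchCount : Int := (terms.map (fun term => if PySem.Str.isIn term lowered then (1 : Int) else 0)).sum
      if matchCount > 0 then scores.insert item matchCount else scores)
    PySem.Dict.empty
  PySem.List.sorted2 scores.keys (fun x => -(scores.getD x 0)) (fun x => x)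

-- ===== PORT B =====
def search_alt (input : String) (catalog : List String) : List String :=
  let terms := PySem.Str.split₀ (PySem.Str.lower input)
  let groups := (PySem.List.dedup catalog).foldl (fun groups item =>
      let lowered := PySem.Str.lower item
      let c : Int := (terms.map (fun term => if PySem.Str.isIn term lowered then (1 : Int) else 0)).sum
      groups.modify c [] (· ++ [item]))
    PySem.Dict.empty
  ((PySem.List.pyRange 1 ((terms.length : Int) + 1) 1).reverse).foldl
    (fun result c => result ++ PySem.List.sorted (groups.getD c []) (fun x => x)) []

-- ===== PRECONDITION & SPEC =====
def Spec_search (input : String) (catalog : List String) (out : List String) : Prop := out = search_alt input catalog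
instance (input : String) (catalog : List String) (out : List String) : Decidable (Spec_search input catalog out) := by unfold Spec_search; infer_instance

-- ===== CLAIM (what is proved, stated in full; the proofs are below) =====
def Claim_equal_search : Prop := ∀ (input : String) (catalog : List String), Dom_search input catalog → Spec_search input catalog (search input catalog)

-- ===== LEMMAS AND PROOFS =====

-- the match count of an item against a term list (shared expression of both ports)
def pvCnt (terms : List String) (item : String) : Int :=
  (terms.map (fun term => if PySem.Str.isIn term (PySem.Str.lower item) then (1 : Int) else 0)).sum

lemma pvCnt_eq_countP (terms : List String) (item : String) :
    pvCnt terms item = (terms.countP (fun term => PySem.Str.isIn term (PySem.Str.lower item)) : Int) := by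
  simpa [pvCnt] using PySem.List.sum_map_ite_one_zero (fun term => PySem.Str.isIn term (PySem.Str.lower item)) terms

lemma pvCnt_le_len (terms : List String) (item : String) : pvCnt terms item ≤ (terms.length : Int) := by
  rw [pvCnt_eq_countP]; exact_mod_cast List.countP_le_length

-- Python's sorted(xs, key=lambda x: (k1(x), k2(x))) is sorted under the lexicographic order
lemma sorted2_eq_sorted_lex {α : Type} (xs : List α) (k1 : α → Int) (k2 : α → String) :
    PySem.List.sorted2 xs k1 k2 = PySem.List.sorted xs (fun x => toLex (k1 x, k2 x)) := by
  rw [PySem.List.sorted_eq_foldl_insertBy]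
  unfold PySem.List.sorted2
  have hfn : (fun (a b : α) => decide (k1 a < k1 b) || (!decide (k1 b < k1 a) && decide (k2 a < k2 b)))
      = fun a b => decide (toLex (k1 a, k2 a) < toLex (k1 b, k2 b)) := by
    funext a b
    rcases lt_trichotomy (k1 a) (k1 b) with h | h | h
    · simp [Prod.Lex.toLex_lt_toLex, h, asymm h]
    · simp [Prod.Lex.toLex_lt_toLex, h]
    · have hnle : ¬ (k1 a ≤ k1 b) := not_le.mpr h
      simp [Prod.Lex.toLex_lt_toLex, h.ne', asymm h, hnle]
  simp only [Bool.false_eq_true, if_false, hfn]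

-- lookup in a fold that inserts each key with a value computed from the key alone
lemma get?_foldl_insert_fn (v : String → Int) (l : List String) (d : PySem.Dict String Int) (x : String) :
    (l.foldl (fun d a => d.insert a (v a)) d).get? x = if x ∈ l then some (v x) else d.get? x := by
  induction l generalizing d with
  | nil => simp
  | cons a l ih =>
      simp only [List.foldl_cons, ih, List.mem_cons, PySem.Dict.get?_insert]
      by_cases hx : x ∈ l <;> by_cases ha : x = a <;> simp [hx, ha]

-- a ++-fold of sorted buckets is a flatMap congruence-permutation of the raw buckets
lemma flatMap_perm_of_perm (cs : List Int) (f g : Int → List String)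
    (h : ∀ c, (f c).Perm (g c)) : (cs.flatMap f).Perm (cs.flatMap g) := by
  induction cs with
  | nil => simp
  | cons c cs ih => simpa [List.flatMap_cons] using (h c).append ih

lemma pyRange_one_natSucc (n : Nat) :
    PySem.List.pyRange 1 ((n : Int) + 1) 1 = (List.range n).map (fun i : Nat => (i : Int) + 1) := by
  induction n with
  | zero => rfl
  | succ n ih =>
      have h : (1 : Int) ≤ (n : Int) + 1 := by omega
      rw [show ((n + 1 : Nat) : Int) + 1 = ((n : Int) + 1) + 1 by push_cast; ring,
        PySem.List.pyRange_one_succ_right h, ih, List.range_succ]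
      simp

-- descending counts list used by B's output loop
def pvCs (T : Nat) : List Int := ((List.range T).map (fun i : Nat => (i : Int) + 1)).reverse

lemma mem_pvCs (T : Nat) (c : Int) : c ∈ pvCs T ↔ 1 ≤ c ∧ c ≤ (T : Int) := by
  rw [pvCs, List.mem_reverse, List.mem_map]
  constructor
  · rintro ⟨i, hi, rfl⟩
    have hi' : i < T := by simpa using hi
    omega
  · rintro ⟨h1, h2⟩
    exact ⟨(c - 1).toNat, by simp; omega, by omega⟩

lemma pairwise_gt_pvCs (T : Nat) : (pvCs T).Pairwise (· > ·) := by
  rw [pvCs, List.pairwise_reverse, List.pairwise_map]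
  exact List.pairwise_lt_range.imp (fun h => by omega)

lemma nodup_pvCs (T : Nat) : (pvCs T).Nodup :=
  (pairwise_gt_pvCs T).imp (fun h => ne_of_gt h)


-- A's score dict and B's bucket dict, as standalone folds (rfl-equal to the ports' folds)
def pvScores (terms : List String) (catalog : List String) : PySem.Dict String Int :=
  catalog.foldl (fun scores item =>
    if pvCnt terms item > 0 then scores.insert item (pvCnt terms item) else scores) PySem.Dict.empty

def pvGroups (terms : List String) (catalog : List String) : PySem.Dict Int (List String) :=
  (PySem.List.dedup catalog).foldl (fun groups item =>
    groups.modify (pvCnt terms item) [] (· ++ [item])) PySem.Dict.empty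

theorem search_eq_alt (input : String) (catalog : List String) :
    search input catalog = search_alt input catalog := by
  set terms := PySem.Str.split₀ (PySem.Str.lower input) with hterms
  set S := pvScores terms catalog with hS
  set bkt : Int → List String :=
    fun c => (PySem.List.dedup catalog).filter (fun i => pvCnt terms i == c) with hbkt
  have hA : search input catalog
      = PySem.List.sorted2 S.keys (fun x => -(S.getD x 0)) (fun x => x) := rfl
  -- characterize A's dict
  set F : List String := catalog.filter (fun i => decide (pvCnt terms i > 0)) with hF
  have hscores : S = F.foldl (fun d a => d.insert a (pvCnt terms a)) PySem.Dict.empty := by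
    rw [hS, pvScores,
      PySem.List.foldl_ite_eq_foldl_filter (fun i => pvCnt terms i > 0)
        (fun d a => d.insert a (pvCnt terms a)) catalog PySem.Dict.empty]
  have hkeys : S.keys = PySem.Set.ofList F := by
    rw [hscores,
      PySem.Dict.keys_foldl_insert F (fun _ x => pvCnt terms x) PySem.Dict.empty,
      PySem.Dict.keys_empty, PySem.Set.update_nil_left]
  have hgetD : ∀ x ∈ catalog, 0 < pvCnt terms x → S.getD x 0 = pvCnt terms x := by
    intro x hx hp
    have hxF : x ∈ F := by
      rw [hF, List.mem_filter]; exact ⟨hx, by simpa using hp⟩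
    rw [hscores, PySem.Dict.getD_eq_get?_getD, get?_foldl_insert_fn, if_pos hxF, Option.getD_some]
  -- characterize B's buckets
  have hbucket : ∀ c : Int, (pvGroups terms catalog).getD c [] = bkt c := by
    intro c
    have hmap : pvGroups terms catalog
        = ((PySem.List.dedup catalog).map (fun i => (pvCnt terms i, i))).foldl
            (fun d p => d.modify p.1 [] (· ++ [p.2])) PySem.Dict.empty := by
      rw [pvGroups, List.foldl_map]
    rw [hmap, PySem.Dict.getD_foldl_modify_append, List.filter_map]
    simp [hbkt, List.map_map, Function.comp_def]
  have hB : search_alt input catalog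
      = (pvCs terms.length).flatMap (fun c => PySem.List.sorted (bkt c) (fun x => x)) := by
    show ((PySem.List.pyRange 1 ((terms.length : Int) + 1) 1).reverse).foldl
        (fun result c => result ++ PySem.List.sorted ((pvGroups terms catalog).getD c []) (fun x => x)) [] = _
    rw [pyRange_one_natSucc, PySem.List.foldl_append_eq_flatMap, List.nil_append]
    show List.flatMap _ ((List.range terms.length).map (fun i : Nat => (i : Int) + 1)).reverse = _
    rw [show ((List.range terms.length).map (fun i : Nat => (i : Int) + 1)).reverse = pvCs terms.length from rfl]
    congr 1
    funext c
    rw [hbucket]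
  -- membership facts
  have hmemb : ∀ (c : Int) (x : String),
      x ∈ PySem.List.sorted (bkt c) (fun x => x) ↔ x ∈ catalog ∧ pvCnt terms x = c := by
    intro c x
    rw [PySem.List.mem_sorted]
    simp [hbkt, List.mem_filter]
  have hmemF : ∀ x, x ∈ PySem.Set.ofList F ↔ x ∈ catalog ∧ 0 < pvCnt terms x := by
    intro x
    rw [PySem.Set.mem_ofList, hF, List.mem_filter]
    simp
  have hnodupbkt : ∀ c, (bkt c).Nodup := fun c => (PySem.List.nodup_dedup catalog).filter _
  have hnodups : ∀ c, (PySem.List.sorted (bkt c) (fun x => x)).Nodup :=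
    fun c => ((PySem.List.sorted_perm (bkt c) (fun x => x) false).nodup_iff).2 (hnodupbkt c)
  -- the permutation
  have hperm : ((pvCs terms.length).flatMap (fun c => PySem.List.sorted (bkt c) (fun x => x))).Perm
      (PySem.Set.ofList F) := by
    refine (flatMap_perm_of_perm _ _ bkt (fun c => PySem.List.sorted_perm (bkt c) (fun x => x) false)).trans ?_
    have hnodupB : ((pvCs terms.length).flatMap bkt).Nodup := by
      rw [List.nodup_flatMap]
      refine ⟨fun c _ => hnodupbkt c, ?_⟩
      refine (nodup_pvCs terms.length).imp ?_
      intro c1 c2 hne x hx1 hx2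
      have h1 : pvCnt terms x = c1 := by
        have := List.mem_filter.1 hx1; simpa using this.2
      have h2 : pvCnt terms x = c2 := by
        have := List.mem_filter.1 hx2; simpa using this.2
      exact hne (h1 ▸ h2 ▸ rfl)
    rw [List.perm_ext_iff_of_nodup hnodupB (PySem.Set.nodup_ofList F)]
    intro x
    rw [List.mem_flatMap, hmemF x]
    constructor
    · rintro ⟨c, hc, hxc⟩
      have hcc := (mem_pvCs terms.length c).1 hc
      have hx := List.mem_filter.1 hxc
      have hxd : x ∈ catalog := (PySem.List.mem_dedup catalog x).1 hx.1
      have hxc' : pvCnt terms x = c := by simpa using hx.2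
      exact ⟨hxd, by omega⟩
    · rintro ⟨hx, hp⟩
      refine ⟨pvCnt terms x, (mem_pvCs terms.length (pvCnt terms x)).2 ⟨hp, pvCnt_le_len terms x⟩, ?_⟩
      rw [hbkt]
      simp [List.mem_filter, hx]
  -- strict pairwise order under the lexicographic key
  have hpair : List.Pairwise (fun a b => (fun x => toLex (-(S.getD x 0), x)) a < (fun x => toLex (-(S.getD x 0), x)) b)
      ((pvCs terms.length).flatMap (fun c => PySem.List.sorted (bkt c) (fun x => x))) := by
    rw [List.flatMap_def, List.pairwise_flatten]
    constructor
    · intro l hl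
      obtain ⟨c, hc, rfl⟩ := List.mem_map.1 hl
      have hc1 : 1 ≤ c := ((mem_pvCs terms.length c).1 hc).1
      have hle := PySem.List.sorted_pairwise (bkt c) (fun x => x)
      refine ((hle.and (hnodups c)).imp_of_mem ?_)
      intro a b ha hb hab
      obtain ⟨haC, hac⟩ := (hmemb c a).1 ha
      obtain ⟨hbC, hbc⟩ := (hmemb c b).1 hb
      have hga : S.getD a 0 = c := by rw [hgetD a haC (by omega), hac]
      have hgb : S.getD b 0 = c := by rw [hgetD b hbC (by omega), hbc]
      rw [Prod.Lex.toLex_lt_toLex]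
      exact Or.inr ⟨by rw [hga, hgb], lt_of_le_of_ne hab.1 hab.2⟩
    · rw [List.pairwise_map]
      refine (pairwise_gt_pvCs terms.length).imp_of_mem ?_
      intro c1 c2 hc1 hc2 hgt x hx y hy
      have hc1' : 1 ≤ c1 := ((mem_pvCs terms.length c1).1 hc1).1
      have hc2' : 1 ≤ c2 := ((mem_pvCs terms.length c2).1 hc2).1
      obtain ⟨hxC, hxc⟩ := (hmemb c1 x).1 hx
      obtain ⟨hyC, hyc⟩ := (hmemb c2 y).1 hy
      have hgx : S.getD x 0 = c1 := by rw [hgetD x hxC (by omega), hxc]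
      have hgy : S.getD y 0 = c2 := by rw [hgetD y hyC (by omega), hyc]
      rw [Prod.Lex.toLex_lt_toLex]
      exact Or.inl (by rw [hgx, hgy]; omega)
  rw [hA, sorted2_eq_sorted_lex, hkeys, hB]
  exact PySem.List.sorted_eq_of_perm_of_pairwise_lt _ _ _ hperm hpair


-- ===== VERDICT (by name: the statement is the Claim_ definition above) =====
theorem search_spec : Claim_equal_search := by
  intro input catalog _
  unfold Spec_search
  exact search_eq_alt input catalog
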